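-- pv_equiv track=rewrite | github.com/theseus27/Coding-Challenges | Interviews/Goldman Sachs/word_compression.py | findSequence
-- ===== SOURCE A (Python) =====
-- def findSequence(word, k):
--     if len(word) <= k:
--         return [-1, -1]
--
--     #Start with each letter in word from 0 to len(word)-k
--     for i in range(0, len(word)-k+1):
--         end = i
--
--         #Find last consecutive same letter
--         for j in range(i, len(word)):
--             if word[i] == word[j]:
--                 end = j
--             else:
--                 break
--
--         #Find endpoint
--         if end != i and end-i+1 >= k:
--             iterations = (end-i+1)//k
--             end = i+iterations*k-1
--             return [i, end]
--
--     return [-1, -1]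
-- ===== SOURCE B (Python) =====
-- def findSequence(word, k):
--     if len(word) <= k:
--         return [-1, -1]
--     n = len(word)
--     i = 0
--     while i < n:
--         j = i + 1
--         while j < n and word[j] == word[i]:
--             j += 1
--         L = j - i
--         if L >= 2 and L >= k:
--             return [i, i + (L // k) * k - 1]
--         i = j
--     return [-1, -1]
-- ===== Notes on version B (the rewrite author's own statement) =====
-- stated objective: alternative
-- what changed: B makes one pass over maximal runs of consecutive equal characters (advancing directly to the end of each run) instead of A's restart of a fresh run scan from every index i in 0..len-k.
import Mathlib
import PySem

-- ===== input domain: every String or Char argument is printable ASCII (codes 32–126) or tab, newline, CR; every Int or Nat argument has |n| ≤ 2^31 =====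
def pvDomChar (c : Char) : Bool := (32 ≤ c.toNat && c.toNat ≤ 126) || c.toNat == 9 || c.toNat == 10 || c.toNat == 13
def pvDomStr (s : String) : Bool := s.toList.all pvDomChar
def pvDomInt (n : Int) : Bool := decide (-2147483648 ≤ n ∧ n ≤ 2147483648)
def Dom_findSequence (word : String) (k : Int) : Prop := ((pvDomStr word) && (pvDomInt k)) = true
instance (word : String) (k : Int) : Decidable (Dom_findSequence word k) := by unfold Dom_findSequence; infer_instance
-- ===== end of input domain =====

-- B replaces A's rescan-from-every-index loop by a single pass over maximal runs of
-- consecutive equal characters (objective: alternative).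

-- ===== PORT A =====
-- inner loop: `for j in range(i, len(word)): if word[i] == word[j]: end = j else: break`
def innerA (cs : List Char) (ci : Option Char) : List Int → Int → Int
  | [], e => e
  | j :: js, e =>
    if PySem.List.pyGet? cs j = ci then innerA cs ci js j else e

-- outer loop: `for i in range(0, len(word)-k+1): … return / continue`
def outerA (cs : List Char) (k : Int) : List Int → List Int
  | [] => [-1, -1]
  | i :: is =>
    let e := innerA cs (PySem.List.pyGet? cs i) (PySem.List.pyRange i (cs.length : Int) 1) i
    if e ≠ i ∧ e - i + 1 ≥ k then
      [i, i + PySem.Int.floordiv (e - i + 1) k * k - 1]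
    else outerA cs k is

def findSequence (word : String) (k : Int) : List Int :=
  if PySem.Str.len word ≤ k then [-1, -1]
  else outerA word.toList k (PySem.List.pyRange 0 (PySem.Str.len word - k + 1) 1)

-- ===== PORT B =====
-- `while j < n and word[j] == word[i]: j += 1` — length of the run continuing with c
def runLenB (c : Char) : List Char → Int
  | [] => 0
  | d :: ds => if d = c then 1 + runLenB c ds else 0

-- advancing `i = j` to the end of the current run
def skipRunB (c : Char) : List Char → List Char
  | [] => []
  | d :: ds => if d = c then skipRunB c ds else d :: ds

-- needed by altGo's termination
theorem skipRunB_length_le (c : Char) (ds : List Char) : (skipRunB c ds).length ≤ ds.length := by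
  induction ds with
  | nil => simp [skipRunB]
  | cons d ds ih => simp only [skipRunB]; split <;> simp; omega

-- `while i < n: … i = j`
def altGo (k : Int) (i : Int) : List Char → List Int
  | [] => [-1, -1]
  | c :: cs =>
    let L := 1 + runLenB c cs
    if 2 ≤ L ∧ k ≤ L then [i, i + PySem.Int.floordiv L k * k - 1]
    else altGo k (i + L) (skipRunB c cs)
termination_by cs => cs.length
decreasing_by exact Nat.lt_succ_of_le (skipRunB_length_le c cs)

def findSequence_alt (word : String) (k : Int) : List Int :=
  if PySem.Str.len word ≤ k then [-1, -1]
  else altGo k 0 word.toList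

-- ===== PRECONDITION & SPEC =====
-- Pre_ excludes exactly the inputs on which A raises ZeroDivisionError (iterations = (end-i+1)//k
-- with k = 0, reached iff the word contains two adjacent equal characters); B raises there too.
def Pre_findSequence (word : String) (k : Int) : Prop :=
  k = 0 → ∀ p ∈ word.toList.zip word.toList.tail, p.1 ≠ p.2
instance (word : String) (k : Int) : Decidable (Pre_findSequence word k) := by
  unfold Pre_findSequence; infer_instance

def pvWitness_findSequence : String × Int := ("aaabbc", 2)

def Spec_findSequence (word : String) (k : Int) (out : List Int) : Prop := out = findSequence_alt word k
instance (word : String) (k : Int) (out : List Int) : Decidable (Spec_findSequence word k out) := by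
  unfold Spec_findSequence; infer_instance

-- ===== CLAIM (what is proved, stated in full; the proofs are below) =====
def Claim_equal_findSequence : Prop := ∀ (word : String) (k : Int), Dom_findSequence word k → Pre_findSequence word k → Spec_findSequence word k (findSequence word k)

-- ===== LEMMAS AND PROOFS =====

theorem runLenB_nonneg (c : Char) (ds : List Char) : 0 ≤ runLenB c ds := by
  induction ds with
  | nil => simp [runLenB]
  | cons d ds ih => simp only [runLenB]; split <;> omega

theorem runLenB_le (c : Char) (ds : List Char) : runLenB c ds ≤ (ds.length : Int) := by
  induction ds with
  | nil => simp [runLenB]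
  | cons d ds ih => simp only [runLenB]; split <;> simp <;> omega

theorem skipRunB_eq_drop (c : Char) (ds : List Char) :
    skipRunB c ds = ds.drop (runLenB c ds).toNat := by
  induction ds with
  | nil => simp [skipRunB]
  | cons d ds ih =>
    simp only [skipRunB, runLenB]
    split
    · have h0 := runLenB_nonneg c ds
      have : (1 + runLenB c ds).toNat = (runLenB c ds).toNat + 1 := by omega
      simp [this, ih]
    · simp

-- characterization of A's inner loop from position j with suffix ds, comparing against c
theorem innerA_char (cs : List Char) (c : Char) :
    ∀ (ds : List Char) (j : Nat) (e : Int), j ≤ cs.length → cs.drop j = ds →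
      innerA cs (some c) (PySem.List.pyRange (j : Int) (cs.length : Int) 1) e
        = if runLenB c ds = 0 then e else (j : Int) + runLenB c ds - 1 := by
  intro ds
  induction ds with
  | nil =>
    intro j e hj hdrop
    have hj' : cs.length ≤ j := by
      by_contra h
      have := List.drop_eq_nil_iff.mp hdrop
      omega
    rw [PySem.List.pyRange_one_eq_nil (by exact_mod_cast hj')]
    simp [innerA, runLenB]
  | cons d rest ih =>
    intro j e hj hdrop
    have hjlt : j < cs.length := by
      by_contra h
      rw [List.drop_eq_nil_iff.mpr (by omega)] at hdrop
      simp at hdrop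
    have hget : cs[j]? = some d := by
      have : (cs.drop j).head? = some d := by rw [hdrop]; rfl
      rwa [List.head?_drop] at this
    rw [PySem.List.pyRange_one_cons (by exact_mod_cast hjlt)]
    simp only [innerA, PySem.List.pyGet?_natCast, hget]
    have hdrop' : cs.drop (j + 1) = rest := by
      rw [← List.tail_drop, hdrop]
      rfl
    by_cases hdc : d = c
    · subst hdc
      have hcast : ((j : Int) + 1) = ((j + 1 : Nat) : Int) := by push_cast; ring
      rw [if_pos rfl, hcast, ih (j + 1) (j : Int) (by omega) hdrop']
      have h0 := runLenB_nonneg d rest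
      have hr : runLenB d (d :: rest) = 1 + runLenB d rest := by simp [runLenB]
      rw [hr]
      by_cases hz : runLenB d rest = 0
      · simp [hz]
      · rw [if_neg hz, if_neg (by omega)]
        push_cast
        ring
    · rw [if_neg (by simp [hdc])]
      simp [runLenB, hdc]

-- positions at or beyond the end of the word all fail A's test
theorem outerA_past_end (cs : List Char) (k : Int) :
    ∀ (fuel : Nat) (a b : Int), (b - a).toNat ≤ fuel → (cs.length : Int) ≤ a →
      outerA cs k (PySem.List.pyRange a b 1) = [-1, -1] := by
  intro fuel
  induction fuel with
  | zero =>
    intro a b hf ha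
    rw [PySem.List.pyRange_one_eq_nil (by omega)]
    simp [outerA]
  | succ m ih =>
    intro a b hf ha
    by_cases hab : a < b
    · rw [PySem.List.pyRange_one_cons hab]
      simp only [outerA]
      rw [PySem.List.pyRange_one_eq_nil ha]
      simp only [innerA]
      rw [if_neg (by simp)]
      exact ih (a + 1) b (by omega) (by omega)
    · rw [PySem.List.pyRange_one_eq_nil (by omega)]
      simp [outerA]

-- one failing position of A's outer loop can be stepped over
theorem outerA_step (cs : List Char) (k hi : Int) (c : Char) (rest : List Char) (m : Nat)
    (hm : m ≤ cs.length) (hdrop : cs.drop m = c :: rest)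
    (hfail : ¬ (2 ≤ 1 + runLenB c rest ∧ k ≤ 1 + runLenB c rest)) :
    outerA cs k (PySem.List.pyRange (m : Int) hi 1)
      = outerA cs k (PySem.List.pyRange ((m : Int) + 1) hi 1) := by
  by_cases hmhi : (m : Int) < hi
  · rw [PySem.List.pyRange_one_cons hmhi]
    simp only [outerA]
    have hget : PySem.List.pyGet? cs (m : Int) = some c := by
      rw [PySem.List.pyGet?_natCast]
      have : (cs.drop m).head? = some c := by rw [hdrop]; rfl
      rwa [List.head?_drop] at this
    rw [hget, innerA_char cs c (c :: rest) m (m : Int) hm hdrop]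
    have h0 := runLenB_nonneg c rest
    have hr : runLenB c (c :: rest) = 1 + runLenB c rest := by simp [runLenB]
    rw [hr, if_neg (by omega)]
  · rw [PySem.List.pyRange_one_eq_nil (by omega), PySem.List.pyRange_one_eq_nil (by omega)]

-- skipping the whole interior of a failing run: every position of the run fails A's test
theorem outerA_skip_run (cs : List Char) (k hi : Int) :
    ∀ (rest : List Char) (c : Char) (m : Nat),
      m ≤ cs.length → cs.drop m = c :: rest →
      ¬ (2 ≤ 1 + runLenB c rest ∧ k ≤ 1 + runLenB c rest) →
      outerA cs k (PySem.List.pyRange (m : Int) hi 1)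
        = outerA cs k (PySem.List.pyRange ((m : Int) + 1 + runLenB c rest) hi 1) := by
  intro rest
  induction rest with
  | nil =>
    intro c m hm hdrop hfail
    rw [outerA_step cs k hi c [] m hm hdrop hfail]
    simp [runLenB]
  | cons d rest2 ih =>
    intro c m hm hdrop hfail
    have hlen : (cs.drop m).length = cs.length - m := List.length_drop ..
    rw [hdrop] at hlen
    simp at hlen
    by_cases hdc : d = c
    · subst hdc
      have hr : runLenB d (d :: rest2) = 1 + runLenB d rest2 := by simp [runLenB]
      have h0 := runLenB_nonneg d rest2
      have hdrop2 : cs.drop (m + 1) = d :: rest2 := by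
        rw [← List.tail_drop, hdrop]
        rfl
      have hfail2 : ¬ (2 ≤ 1 + runLenB d rest2 ∧ k ≤ 1 + runLenB d rest2) := by
        rw [hr] at hfail
        rintro ⟨h1, h2⟩
        exact hfail ⟨by omega, by omega⟩
      rw [outerA_step cs k hi d (d :: rest2) m hm hdrop hfail]
      have hcast : ((m : Int) + 1) = ((m + 1 : Nat) : Int) := by push_cast; ring
      rw [hcast, ih d (m + 1) (by omega) hdrop2 hfail2, hr]
      congr 1
      push_cast
      ring
    · have hr : runLenB c (d :: rest2) = 0 := by simp [runLenB, hdc]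
      rw [outerA_step cs k hi c (d :: rest2) m hm hdrop (by rw [hr] at hfail ⊢; exact hfail), hr]
      simp

-- the main correspondence: from any suffix position, A's remaining outer loop equals B's run loop
theorem main_corr (cs : List Char) (k : Int) :
    ∀ (fuel : Nat) (ds : List Char) (j : Nat), ds.length ≤ fuel →
      j ≤ cs.length → cs.drop j = ds →
      outerA cs k (PySem.List.pyRange (j : Int) ((cs.length : Int) - k + 1) 1)
        = altGo k (j : Int) ds := by
  intro fuel
  induction fuel with
  | zero =>
    intro ds j hf hj hdrop
    have hds : ds = [] := List.length_eq_zero_iff.mp (by omega)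
    subst hds
    have hcl : cs.length ≤ j := List.drop_eq_nil_iff.mp hdrop
    rw [outerA_past_end cs k ((cs.length : Int) - k + 1 - (j : Int)).toNat (j : Int)
      ((cs.length : Int) - k + 1) (le_refl _) (by exact_mod_cast hcl)]
    simp [altGo]
  | succ f ih =>
    intro ds j hf hj hdrop
    match ds, hf, hdrop with
    | [], hf, hdrop =>
      have hcl : cs.length ≤ j := List.drop_eq_nil_iff.mp hdrop
      rw [outerA_past_end cs k ((cs.length : Int) - k + 1 - (j : Int)).toNat (j : Int)
        ((cs.length : Int) - k + 1) (le_refl _) (by exact_mod_cast hcl)]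
      simp [altGo]
    | c :: rest, hf, hdrop =>
      have hlen : (cs.drop j).length = cs.length - j := List.length_drop ..
      rw [hdrop] at hlen
      simp at hlen
      have hf' : rest.length ≤ f := by simpa using hf
      have h0 := runLenB_nonneg c rest
      have hle := runLenB_le c rest
      by_cases hcond : 2 ≤ 1 + runLenB c rest ∧ k ≤ 1 + runLenB c rest
      · -- the run at j succeeds: both sides return here
        have hjhi : (j : Int) < (cs.length : Int) - k + 1 := by omega
        rw [PySem.List.pyRange_one_cons hjhi]
        simp only [outerA]
        have hget : PySem.List.pyGet? cs (j : Int) = some c := by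
          rw [PySem.List.pyGet?_natCast]
          have : (cs.drop j).head? = some c := by rw [hdrop]; rfl
          rwa [List.head?_drop] at this
        rw [hget, innerA_char cs c (c :: rest) j (j : Int) hj hdrop]
        have hr : runLenB c (c :: rest) = 1 + runLenB c rest := by simp [runLenB]
        rw [hr]
        rw [if_neg (show ¬((1 : Int) + runLenB c rest = 0) by omega)]
        have hcnd : ((j : Int) + (1 + runLenB c rest) - 1 ≠ (j : Int)) ∧
            ((j : Int) + (1 + runLenB c rest) - 1 - (j : Int) + 1 ≥ k) := ⟨by omega, by omega⟩
        rw [if_pos hcnd]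
        simp only [altGo]
        rw [if_pos hcond]
        have he : (j : Int) + (1 + runLenB c rest) - 1 - (j : Int) + 1 = 1 + runLenB c rest := by
          ring
        rw [he]
      · -- the run at j fails: A skips its interior, B jumps to the next run
        rw [outerA_skip_run cs k ((cs.length : Int) - k + 1) rest c j hj hdrop hcond]
        simp only [altGo]
        rw [if_neg hcond]
        have hdrop1 : cs.drop (j + 1) = rest := by
          rw [← List.tail_drop, hdrop]
          rfl
        have hdropN : cs.drop (j + 1 + (runLenB c rest).toNat) = skipRunB c rest := by
          rw [skipRunB_eq_drop, ← hdrop1, List.drop_drop]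
        have hskiplen := skipRunB_length_le c rest
        have hcast : (j : Int) + 1 + runLenB c rest
            = ((j + 1 + (runLenB c rest).toNat : Nat) : Int) := by
          push_cast
          omega
        rw [hcast, ih (skipRunB c rest) (j + 1 + (runLenB c rest).toNat) (by omega)
          (by omega) hdropN]
        congr 1
        push_cast
        omega

-- ===== VERDICT (by name: the statement is the Claim_ definition above) =====
theorem findSequence_spec : Claim_equal_findSequence := by
  intro word k _ _
  unfold Spec_findSequence findSequence findSequence_alt
  have hlen : PySem.Str.len word = (word.toList.length : Int) := by
    simp [PySem.Str.len_eq]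
  rw [hlen]
  by_cases h : (word.toList.length : Int) ≤ k
  · rw [if_pos h, if_pos h]
  · rw [if_neg h, if_neg h]
    have := main_corr word.toList k word.toList.length word.toList 0 (le_refl _) (Nat.zero_le _) (by simp)
    simpa using this
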